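-- pv_equiv track=rewrite | github.com/lsankar4033/programming_gym | hackerrank/missing_numbers/run.py | get_missing_numbers
-- ===== SOURCE A (Python) =====
-- from collections import defaultdict
--
-- def get_counts(lst):
--     counts = defaultdict(lambda : 0)
--     for x in lst:
--         counts[x] += 1
--
--     return counts
--
-- def get_missing_numbers(a, b):
--     a_counts = get_counts(a)
--     b_counts = get_counts(b)
--
--     missing_counts = {}
--     for x, n in b_counts.items():
--         missing_counts[x] = b_counts[x] - a_counts[x]
--
--     missing_nums = []
--     for x, n in sorted(missing_counts.items()):
--         for i in range(n):
--             missing_nums.append(x)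
--
--     return missing_nums
-- ===== SOURCE B (Python) =====
-- def get_missing_numbers(a, b):
--     sa = sorted(a)
--     sb = sorted(b)
--     res = []
--     i = j = 0
--     while i < len(sa) and j < len(sb):
--         if sa[i] == sb[j]:
--             i += 1
--             j += 1
--         elif sa[i] < sb[j]:
--             i += 1
--         else:
--             res.append(sb[j])
--             j += 1
--     res.extend(sb[j:])
--     return res
-- ===== Notes on version B (the rewrite author's own statement) =====
-- stated objective: alternative
-- what changed: Replaced the dict-counting pass (count a, count b, subtract per key, sort the items, replay each positive excess with an inner range loop) by sorting fresh copies of both lists and merging them with two indices, emitting each b-element with no matching a-element directly in order.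
import Mathlib
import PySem

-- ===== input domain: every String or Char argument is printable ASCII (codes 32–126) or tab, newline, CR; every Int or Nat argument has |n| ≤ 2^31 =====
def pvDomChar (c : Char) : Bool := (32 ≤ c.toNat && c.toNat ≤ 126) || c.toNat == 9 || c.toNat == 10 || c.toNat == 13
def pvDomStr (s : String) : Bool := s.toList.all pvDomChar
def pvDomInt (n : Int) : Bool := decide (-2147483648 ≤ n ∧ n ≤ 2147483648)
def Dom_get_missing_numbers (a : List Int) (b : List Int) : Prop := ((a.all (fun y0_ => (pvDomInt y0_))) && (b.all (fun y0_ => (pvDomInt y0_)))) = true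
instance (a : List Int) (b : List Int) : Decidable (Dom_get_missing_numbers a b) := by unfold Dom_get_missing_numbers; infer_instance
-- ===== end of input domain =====

-- B replaces A's dict-counting + key-sorted replay by a two-pointer merge of the two sorted lists (alternative decomposition, same asymptotic cost).


-- ===== PORT A =====
-- counts = defaultdict(lambda: 0); for x in lst: counts[x] += 1
def get_counts (lst : List Int) : PySem.Dict Int Int :=
  lst.foldl (fun counts x => counts.modify x 0 (· + 1)) PySem.Dict.empty

def get_missing_numbers (a : List Int) (b : List Int) : List Int :=
  let a_counts := get_counts a
  let b_counts := get_counts b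
  -- a_counts[x] on a missing key: the defaultdict returns 0 (its insertion side-effect is
  -- unobservable, a_counts is never read again) → getD _ 0, exact here
  let missing_counts := b_counts.items.foldl
    (fun m p => m.insert p.1 (b_counts.getD p.1 0 - a_counts.getD p.1 0)) PySem.Dict.empty
  -- sorted(missing_counts.items()): dict keys are distinct, so Python's lexicographic sort
  -- of the (key, value) pairs coincides with the stable sort by key — exact here
  let pairs := PySem.List.sorted missing_counts.items (fun p => p.1) false
  pairs.foldl (fun missing_nums p =>
    (PySem.List.pyRange 0 p.2 1).foldl (fun acc _ => acc ++ [p.1]) missing_nums) []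

-- ===== PORT B =====
-- the while loop of Source B: the two indices i, j become the remaining suffixes of sa, sb
def mergeMissing : List Int → List Int → List Int
  | [], sb => sb                 -- i == len(sa): res.extend(sb[j:])
  | _, [] => []                  -- j == len(sb): nothing left to add
  | x :: sa, y :: sb =>
    if x == y then mergeMissing sa sb
    else if x < y then mergeMissing (sa) (y :: sb)
    else y :: mergeMissing (x :: sa) sb
termination_by sa sb => sa.length + sb.length
decreasing_by all_goals (simp only [List.length_cons]; omega)

def get_missing_numbers_alt (a : List Int) (b : List Int) : List Int :=
  mergeMissing (PySem.List.sorted a (fun x => x) false) (PySem.List.sorted b (fun x => x) false)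

-- ===== PRECONDITION & SPEC =====
def Spec_get_missing_numbers (a : List Int) (b : List Int) (out : List Int) : Prop := out = get_missing_numbers_alt a b
instance (a : List Int) (b : List Int) (out : List Int) : Decidable (Spec_get_missing_numbers a b out) := by unfold Spec_get_missing_numbers; infer_instance

-- ===== CLAIM (what is proved, stated in full; the proofs are below) =====
def Claim_equal_get_missing_numbers : Prop := ∀ (a : List Int) (b : List Int), Dom_get_missing_numbers a b → Spec_get_missing_numbers a b (get_missing_numbers a b)

-- ===== LEMMAS AND PROOFS =====

-- B side: the merge result is a sublist of sb, hence sorted when sb is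
theorem mergeMissing_sublist (sa sb : List Int) : (mergeMissing sa sb).Sublist sb := by
  induction sa, sb using mergeMissing.induct with
  | case1 sb => simp [mergeMissing]
  | case2 => simp [mergeMissing]
  | case3 x sa y sb h ih =>
      simp only [mergeMissing, h, if_true]
      exact ih.trans (List.sublist_cons_self _ _)
  | case4 x sa y sb h1 h2 ih =>
      simp only [mergeMissing, h1, h2, if_true]
      exact ih
  | case5 x sa y sb h1 h2 ih =>
      simp only [mergeMissing, h1, h2, if_false]
      exact ih.cons₂ _

theorem count_eq_zero_of_lt_head (z y : Int) (l : List Int)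
    (hp : (y :: l).Pairwise (· ≤ ·)) (h : z < y) : (y :: l).count z = 0 := by
  refine List.count_eq_zero_of_not_mem ?_
  intro hm
  rcases List.mem_cons.mp hm with rfl | hm
  · omega
  · exact absurd ((List.pairwise_cons.mp hp).1 z hm) (by omega)

-- B side: counts of the merge are the truncated differences of counts
theorem mergeMissing_count (sa sb : List Int)
    (ha : sa.Pairwise (· ≤ ·)) (hb : sb.Pairwise (· ≤ ·)) (z : Int) :
    (mergeMissing sa sb).count z = sb.count z - sa.count z := by
  induction sa, sb using mergeMissing.induct with
  | case1 sb => simp [mergeMissing]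
  | case2 => simp [mergeMissing]
  | case3 x sa y sb h ih =>
      have hxy : x = y := by simpa using h
      subst hxy
      have hstep : mergeMissing (x :: sa) (x :: sb) = mergeMissing sa sb := by
        simp [mergeMissing]
      rw [hstep, ih (List.Pairwise.of_cons ha) (List.Pairwise.of_cons hb)]
      by_cases hz : z = x <;> simp [List.count_cons, hz] <;> omega
      
  | case4 x sa y sb h1 h2 ih =>
      have hstep : mergeMissing (x :: sa) (y :: sb) = mergeMissing sa (y :: sb) := by
        simp [mergeMissing, h1, h2]
      rw [hstep, ih (List.Pairwise.of_cons ha) hb]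
      by_cases hz : x = z
      · rw [count_eq_zero_of_lt_head z y sb hb (hz ▸ h2)]
        simp
      · rw [List.count_cons_of_ne hz]
  | case5 x sa y sb h1 h2 ih =>
      have hstep : mergeMissing (x :: sa) (y :: sb) = y :: mergeMissing (x :: sa) sb := by
        simp [mergeMissing, h1, h2]
      have hyx : y < x := by
        have h1' : ¬ x = y := by simpa using h1
        omega
      rw [hstep]
      by_cases hz : y = z
      · subst hz
        rw [List.count_cons_self, List.count_cons_self,
          ih ha (List.Pairwise.of_cons hb), count_eq_zero_of_lt_head y x sa ha hyx]
        omega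
      · rw [List.count_cons_of_ne hz, List.count_cons_of_ne hz,
          ih ha (List.Pairwise.of_cons hb)]

-- A side: the inner `for i in range(n): append(x)` fold appends n.toNat copies
theorem foldl_const_append (l : List Int) (x : Int) (acc : List Int) :
    l.foldl (fun acc _ => acc ++ [x]) acc = acc ++ List.replicate l.length x := by
  induction l generalizing acc with
  | nil => simp
  | cons h t ih =>
      simp only [List.foldl_cons, List.length_cons, ih]
      rw [List.append_assoc]
      simp [List.replicate_succ]

theorem foldl_range_append (n : Int) (x : Int) (acc : List Int) :
    (PySem.List.pyRange 0 n 1).foldl (fun acc _ => acc ++ [x]) acc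
      = acc ++ List.replicate n.toNat x := by
  rw [foldl_const_append]
  simp [PySem.List.length_pyRange_one]

-- A side: the whole of A, rewritten as a flatMap over the sorted distinct values of b
theorem get_missing_numbers_eq_flatMap (a b : List Int) :
    get_missing_numbers a b
      = (PySem.List.sorted (PySem.Set.ofList b) (fun x => x) false).flatMap
          (fun k => List.replicate (((b.count k : Int) - (a.count k : Int)).toNat) k) := by
  unfold get_missing_numbers
  dsimp only []
  have hgc : ∀ l : List Int, get_counts l = PySem.Dict.counter l := fun _ => rfl
  rw [hgc, hgc]
  have hfresh :
      ((PySem.Dict.counter b).items.foldl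
        (fun m p => m.insert p.1
          ((PySem.Dict.counter b).getD p.1 0 - (PySem.Dict.counter a).getD p.1 0))
        PySem.Dict.empty).items
      = (PySem.Dict.counter b).items.map
          (fun p => (p.1, (PySem.Dict.counter b).getD p.1 0 - (PySem.Dict.counter a).getD p.1 0)) := by
    rw [PySem.Dict.items_foldl_insert_fresh]
    · rfl
    · intro p _; rfl
    · exact PySem.Dict.nodup_keys_counter b
  rw [hfresh]
  have hitems :
      (PySem.Dict.counter b).items.map
          (fun p => (p.1, (PySem.Dict.counter b).getD p.1 0 - (PySem.Dict.counter a).getD p.1 0))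
        = (PySem.Set.ofList b).map
            (fun k => (k, (b.count k : Int) - (a.count k : Int))) := by
    rw [PySem.Dict.items_counter]
    simp [PySem.Dict.getD_counter]
  rw [hitems]
  have hsorted :
      PySem.List.sorted
          ((PySem.Set.ofList b).map (fun k => (k, (b.count k : Int) - (a.count k : Int))))
          (fun p => p.1) false
        = (PySem.List.sorted (PySem.Set.ofList b) (fun x => x) false).map
            (fun k => (k, (b.count k : Int) - (a.count k : Int))) := by
    apply PySem.List.sorted_eq_of_perm_of_pairwise_lt
    · exact (PySem.List.sorted_perm _ _ _).map _
    · have := PySem.List.sorted_ofList_pairwise_lt (xs := b)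
      exact this.map _ (by intro p q h; simpa using h)
  rw [hsorted]
  rw [List.foldl_map]
  have hfold : ∀ (L : List Int) (acc : List Int),
      L.foldl (fun missing_nums k =>
        (PySem.List.pyRange 0 ((b.count k : Int) - (a.count k : Int)) 1).foldl
          (fun acc _ => acc ++ [k]) missing_nums) acc
      = acc ++ L.flatMap (fun k => List.replicate (((b.count k : Int) - (a.count k : Int)).toNat) k) := by
    intro L
    induction L with
    | nil => simp
    | cons h t ih =>
        intro acc
        rw [List.foldl_cons, foldl_range_append, ih, List.append_assoc]
        simp
  simpa using hfold _ []

theorem count_flatMap_replicate (L : List Int) (hN : L.Nodup) (g : Int → Nat) (z : Int) :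
    (L.flatMap (fun k => List.replicate (g k) k)).count z = if z ∈ L then g z else 0 := by
  induction L with
  | nil => simp
  | cons k L' ih =>
      simp only [List.flatMap_cons, List.count_append, List.count_replicate,
        ih hN.of_cons, List.mem_cons]
      by_cases hz : z = k
      · subst hz
        have : z ∉ L' := (List.nodup_cons.mp hN).1
        simp [this]
      · simp [hz, Ne.symm hz]

theorem pairwise_flatMap_replicate (L : List Int) (hp : L.Pairwise (· < ·)) (g : Int → Nat) :
    (L.flatMap (fun k => List.replicate (g k) k)).Pairwise (· ≤ ·) := by
  induction L with
  | nil => simp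
  | cons k L' ih =>
      simp only [List.flatMap_cons]
      refine List.pairwise_append.mpr ⟨?_, ih hp.of_cons, ?_⟩
      · exact List.pairwise_replicate.mpr (Or.inr le_rfl)
      · intro u hu v hv
        obtain ⟨w, hw, hvw⟩ := List.mem_flatMap.mp hv
        rw [(List.mem_replicate.mp hu).2, (List.mem_replicate.mp hvw).2]
        exact le_of_lt ((List.pairwise_cons.mp hp).1 w hw)

-- counts of A's result
theorem get_missing_numbers_count (a b : List Int) (z : Int) :
    (get_missing_numbers a b).count z = b.count z - a.count z := by
  rw [get_missing_numbers_eq_flatMap]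
  rw [count_flatMap_replicate _ ((PySem.List.sorted_perm _ _ _).nodup_iff.mpr (PySem.Set.nodup_ofList b))]
  by_cases hz : z ∈ b
  · have : z ∈ PySem.List.sorted (PySem.Set.ofList b) (fun x => x) false := by
      rw [PySem.List.mem_sorted]
      simpa [PySem.Set.mem_ofList] using hz
    simp only [this, if_true]
    omega
  · have : z ∉ PySem.List.sorted (PySem.Set.ofList b) (fun x => x) false := by
      rw [PySem.List.mem_sorted]
      simpa [PySem.Set.mem_ofList] using hz
    simp only [this, if_false]
    have : b.count z = 0 := List.count_eq_zero_of_not_mem hz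
    omega

-- A's result is sorted
theorem get_missing_numbers_pairwise (a b : List Int) :
    (get_missing_numbers a b).Pairwise (· ≤ ·) := by
  rw [get_missing_numbers_eq_flatMap]
  exact pairwise_flatMap_replicate _ (PySem.List.sorted_ofList_pairwise_lt b) _

-- counts of B's result
theorem alt_count (a b : List Int) (z : Int) :
    (get_missing_numbers_alt a b).count z = b.count z - a.count z := by
  unfold get_missing_numbers_alt
  rw [mergeMissing_count _ _ (PySem.List.sorted_pairwise _ _) (PySem.List.sorted_pairwise _ _) z,
    (PySem.List.sorted_perm a _ _).count_eq, (PySem.List.sorted_perm b _ _).count_eq]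

-- B's result is sorted
theorem alt_pairwise (a b : List Int) :
    (get_missing_numbers_alt a b).Pairwise (· ≤ ·) := by
  unfold get_missing_numbers_alt
  exact List.Pairwise.sublist (mergeMissing_sublist _ _) (PySem.List.sorted_pairwise _ _)

-- ===== VERDICT (by name: the statement is the Claim_ definition above) =====
theorem get_missing_numbers_spec : Claim_equal_get_missing_numbers := by
  intro a b _
  unfold Spec_get_missing_numbers
  exact List.Perm.eq_of_pairwise' (get_missing_numbers_pairwise a b) (alt_pairwise a b)
    (List.perm_iff_count.mpr (fun z => by rw [get_missing_numbers_count, alt_count]))
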